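-- pv_equiv track=rewrite | github.com/Mercerenies/eulers-melting-pot | etc/problem117.py | f
-- ===== SOURCE A (Python) =====
-- def get(arr, n):
--     if n < 0:
--         return 0
--     else:
--         return arr[n]
--
-- def f(n):
--     gray = [0 for _ in range(n+1)]
--     col  = [0 for _ in range(n+1)]
--
--     gray[0] = 1
--     col[0] = 1
--
--     for i in range(1, n+1):
--         g = get(col, i - 2) + get(col, i - 3) + get(col, i - 4)
--         gray[i] = g
--
--         r = 0
--         for j in range(i):
--             r += gray[j]
--         col[i] = r + g
--
--     return col[n] - 1
-- ===== SOURCE B (Python) =====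
-- def f(n):
--     # col is the prefix sum of gray, so col[i] = col[i-1] + gray[i]
--     # = col[i-1] + col[i-2] + col[i-3] + col[i-4]: a tetranacci recurrence.
--     c1, c2, c3, c4 = 1, 0, 0, 0
--     for _ in range(n):
--         c1, c2, c3, c4 = c1 + c2 + c3 + c4, c1, c2, c3
--     return c1 - 1
-- ===== Notes on version B (the rewrite author's own statement) =====
-- stated objective: faster
-- what changed: B replaces A's two DP arrays with an O(n²) inner re-summation by the four-variable tetranacci recurrence col[i]=col[i-1]+col[i-2]+col[i-3]+col[i-4] (col is the prefix sum of gray), computed in one O(n) pass with O(1) memory.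
import Mathlib
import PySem

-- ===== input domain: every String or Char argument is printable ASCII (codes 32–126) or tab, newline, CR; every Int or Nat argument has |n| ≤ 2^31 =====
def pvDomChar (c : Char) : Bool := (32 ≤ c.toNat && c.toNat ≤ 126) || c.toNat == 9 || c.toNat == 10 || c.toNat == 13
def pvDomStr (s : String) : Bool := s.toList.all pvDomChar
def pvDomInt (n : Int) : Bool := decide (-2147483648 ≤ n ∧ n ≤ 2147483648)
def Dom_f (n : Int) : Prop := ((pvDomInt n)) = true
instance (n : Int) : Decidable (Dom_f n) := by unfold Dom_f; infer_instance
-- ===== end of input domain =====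

-- B replaces A's O(n²) DP (inner re-summation of gray) by the O(n) four-variable
-- tetranacci recurrence col[i] = col[i-1]+col[i-2]+col[i-3]+col[i-4].

-- ===== PORT A =====
-- Python helper `get(arr, n)`: 0 for negative index, else arr[n].
-- pyGetD is exact here: under Pre_f every non-negative access A makes is in range.
def pyget (arr : List Int) (n : Int) : Int :=
  if n < 0 then 0 else PySem.List.pyGetD arr n 0

-- the body of A's `for i in range(1, n+1)` loop, state = (gray, col)
def stepA (st : List Int × List Int) (i : Int) : List Int × List Int :=
  let g := pyget st.2 (i - 2) + pyget st.2 (i - 3) + pyget st.2 (i - 4)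
  let gray := PySem.List.pySetD st.1 i g
  let r := (PySem.List.pyRange 0 i 1).foldl (fun r j => r + pyget gray j) 0
  (gray, PySem.List.pySetD st.2 i (r + g))

-- `[0 for _ in range(n+1)]` then `lst[0] = 1` (pySetD exact under Pre_f: the list is nonempty)
def initL (n : Int) : List Int :=
  PySem.List.pySetD ((PySem.List.pyRange 0 (n + 1) 1).map (fun _ => (0 : Int))) 0 1

def f (n : Int) : Int :=
  let st := (PySem.List.pyRange 1 (n + 1) 1).foldl stepA (initL n, initL n)
  PySem.List.pyGetD st.2 n 0 - 1   -- col[n] - 1; in range under Pre_f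

-- ===== PORT B =====
-- state = (c1, c2, c3, c4) = (col[i-1], col[i-2], col[i-3], col[i-4])
def stepB (st : Int × Int × Int × Int) (_ : Int) : Int × Int × Int × Int :=
  (st.1 + st.2.1 + st.2.2.1 + st.2.2.2, st.1, st.2.1, st.2.2.1)

def f_alt (n : Int) : Int :=
  ((PySem.List.pyRange 0 n 1).foldl stepB (1, 0, 0, 0)).1 - 1

-- ===== PRECONDITION & SPEC =====
-- Pre_f excludes exactly n < 0, where A raises IndexError at `gray[0] = 1` (empty list).
def Pre_f (n : Int) : Prop := 0 ≤ n
instance (n : Int) : Decidable (Pre_f n) := by unfold Pre_f; infer_instance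
def pvWitness_f : Int := 5
def Spec_f (n : Int) (out : Int) : Prop := out = f_alt n
instance (n : Int) (out : Int) : Decidable (Spec_f n out) := by unfold Spec_f; infer_instance

-- ===== CLAIM (what is proved, stated in full; the proofs are below) =====
def Claim_equal_f : Prop := ∀ (n : Int), Dom_f n → Pre_f n → Spec_f n (f n)

-- ===== LEMMAS AND PROOFS =====

-- B's state after k iterations (stepB ignores its list element)
def T : Nat → Int × Int × Int × Int
  | 0 => (1, 0, 0, 0)
  | k + 1 => stepB (T k) 0

-- the mathematical sequences A computes: colS k = col[k], grayS k = gray[k]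
def colS (k : Nat) : Int := (T k).1

def grayS : Nat → Int
  | 0 => 1
  | k + 1 => (T k).2.1 + (T k).2.2.1 + (T k).2.2.2

def prefixG : Nat → Int
  | 0 => 0
  | m + 1 => prefixG m + grayS m

lemma foldB (l : List Int) : ∀ k : Nat, l.foldl stepB (T k) = T (k + l.length) := by
  induction l with
  | nil => intro k; simp
  | cons a l ih =>
      intro k
      have h : stepB (T k) a = T (k + 1) := rfl
      simp only [List.foldl_cons, h, ih (k + 1), List.length_cons]
      ring_nf

lemma colS_succ (k : Nat) : colS (k + 1) = colS k + grayS (k + 1) := by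
  simp [colS, grayS, T, stepB]; ring

lemma prefix_colS : ∀ m : Nat, prefixG (m + 1) = colS m := by
  intro m
  induction m with
  | zero => decide
  | succ m ih =>
      show prefixG (m + 1) + grayS (m + 1) = colS (m + 1)
      rw [ih, colS_succ]

lemma sum_pyget (L : List Int) (m : Nat)
    (h : ∀ j : Nat, j < m → L.getD j 0 = grayS j) :
    (PySem.List.pyRange 0 (m : Int) 1).foldl (fun r j => r + pyget L j) 0 = prefixG m := by
  induction m with
  | zero => simp [PySem.List.pyRange_one_eq_nil, prefixG]
  | succ m ih =>
      have hc : ((m + 1 : Nat) : Int) = (m : Int) + 1 := by push_cast; ring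
      rw [hc, PySem.List.pyRange_one_succ_right (by omega), List.foldl_append]
      simp only [List.foldl_cons, List.foldl_nil]
      rw [ih (fun j hj => h j (by omega))]
      have hv : pyget L (m : Int) = grayS m := by
        simp only [pyget, if_neg (by omega : ¬ ((m : Int) < 0)),
          PySem.List.pyGetD_natCast]
        exact h m (by omega)
      rw [hv]; rfl

lemma getD_set (xs : List Int) (m j : Nat) (v : Int) :
    (xs.set m v).getD j 0 = if j = m ∧ m < xs.length then v else xs.getD j 0 := by
  simp only [List.getD, List.getElem?_set]
  by_cases h1 : m = j
  · subst h1
    by_cases h2 : m < xs.length <;> simp [h2]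
  · rw [if_neg h1, if_neg (fun h : j = m ∧ m < xs.length => h1 h.1.symm)]

lemma g_eq (C : List Int) (k : Nat)
    (hC : ∀ j : Nat, j ≤ k → C.getD j 0 = colS j) :
    pyget C ((k : Int) - 1) + pyget C ((k : Int) - 2) + pyget C ((k : Int) - 3)
      = grayS (k + 1) := by
  have h1 : pyget C ((k : Int) - 1) = (T k).2.1 := by
    match k with
    | 0 => simp [pyget]; rfl
    | m + 1 =>
        have hc : ((m + 1 : Nat) : Int) - 1 = (m : Int) := by push_cast; ring
        rw [hc]
        simp only [pyget, if_neg (by omega : ¬ ((m : Int) < 0)),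
          PySem.List.pyGetD_natCast]
        rw [hC m (by omega)]; rfl
  have h2 : pyget C ((k : Int) - 2) = (T k).2.2.1 := by
    match k with
    | 0 => simp [pyget]; rfl
    | 1 => simp [pyget]; rfl
    | m + 2 =>
        have hc : ((m + 2 : Nat) : Int) - 2 = (m : Int) := by push_cast; ring
        rw [hc]
        simp only [pyget, if_neg (by omega : ¬ ((m : Int) < 0)),
          PySem.List.pyGetD_natCast]
        rw [hC m (by omega)]; rfl
  have h3 : pyget C ((k : Int) - 3) = (T k).2.2.2 := by
    match k with
    | 0 => simp [pyget]; rfl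
    | 1 => simp [pyget]; rfl
    | 2 => simp [pyget]; rfl
    | m + 3 =>
        have hc : ((m + 3 : Nat) : Int) - 3 = (m : Int) := by push_cast; ring
        rw [hc]
        simp only [pyget, if_neg (by omega : ¬ ((m : Int) < 0)),
          PySem.List.pyGetD_natCast]
        rw [hC m (by omega)]; rfl
  rw [h1, h2, h3]; rfl

lemma initL_length (n : Int) (hn : 0 ≤ n) : (initL n).length = n.toNat + 1 := by
  simp [initL, PySem.List.length_pyRange_one]
  omega

lemma initL_getD (n : Int) (hn : 0 ≤ n) (j : Nat) :
    (initL n).getD j 0 = if j = 0 then 1 else 0 := by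
  have hl : ((PySem.List.pyRange 0 (n + 1) 1).map (fun _ => (0 : Int))).length
      = n.toNat + 1 := by
    simp [PySem.List.length_pyRange_one]; omega
  simp only [initL]
  rw [PySem.List.pySetD_of_nonneg _ _ (by omega : (0:Int) ≤ 0)]
  rw [show ((0 : Int).toNat) = 0 from rfl, getD_set _ 0 j 1]
  by_cases hj : j = 0
  · simp [hj]
    omega
  · rw [if_neg (fun h : j = 0 ∧ _ => hj h.1), if_neg hj]
    simp only [List.getD, List.getElem?_map]
    cases (PySem.List.pyRange 0 (n + 1) 1)[j]? <;> simp

lemma loopA (n : Int) (hn : 0 ≤ n) :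
    ∀ k : Nat, (k : Int) ≤ n →
      ((PySem.List.pyRange 1 ((k : Int) + 1) 1).foldl stepA (initL n, initL n)).1.length
          = n.toNat + 1 ∧
      ((PySem.List.pyRange 1 ((k : Int) + 1) 1).foldl stepA (initL n, initL n)).2.length
          = n.toNat + 1 ∧
      (∀ j : Nat, j ≤ k →
        ((PySem.List.pyRange 1 ((k : Int) + 1) 1).foldl stepA (initL n, initL n)).1.getD j 0
          = grayS j) ∧
      (∀ j : Nat, j ≤ k →
        ((PySem.List.pyRange 1 ((k : Int) + 1) 1).foldl stepA (initL n, initL n)).2.getD j 0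
          = colS j) := by
  intro k
  induction k with
  | zero =>
      intro _
      rw [show ((0 : Nat) : Int) + 1 = 1 by norm_num, PySem.List.pyRange_one_eq_nil le_rfl]
      simp only [List.foldl_nil]
      refine ⟨initL_length n hn, initL_length n hn, ?_, ?_⟩ <;>
        · intro j hj
          interval_cases j
          rw [initL_getD n hn 0]; rfl
  | succ k ih =>
      intro hk1
      have hk : (k : Int) ≤ n := by push_cast at hk1 ⊢; omega
      obtain ⟨hG, hC, hg, hc⟩ := ih hk
      set st := (PySem.List.pyRange 1 ((k : Int) + 1) 1).foldl stepA (initL n, initL n)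
        with hst
      have hcast : ((k + 1 : Nat) : Int) + 1 = ((k : Int) + 1) + 1 := by push_cast; ring
      rw [hcast, PySem.List.pyRange_one_succ_right (by omega), List.foldl_append]
      simp only [List.foldl_cons, List.foldl_nil]
      rw [← hst]
      -- one application of stepA at i = k+1
      have hkn : k + 1 ≤ n.toNat := by omega
      have hgval : pyget st.2 ((k : Int) + 1 - 2) + pyget st.2 ((k : Int) + 1 - 3)
          + pyget st.2 ((k : Int) + 1 - 4) = grayS (k + 1) := by
        have e1 : (k : Int) + 1 - 2 = (k : Int) - 1 := by ring
        have e2 : (k : Int) + 1 - 3 = (k : Int) - 2 := by ring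
        have e3 : (k : Int) + 1 - 4 = (k : Int) - 3 := by ring
        rw [e1, e2, e3]; exact g_eq st.2 k hc
      simp only [stepA, hgval]
      have hsetG : PySem.List.pySetD st.1 ((k : Int) + 1) (grayS (k + 1))
          = st.1.set (k + 1) (grayS (k + 1)) := by
        rw [show ((k : Int) + 1) = ((k + 1 : Nat) : Int) by push_cast; ring,
          PySem.List.pySetD_natCast]
      have hsetC : ∀ v : Int, PySem.List.pySetD st.2 ((k : Int) + 1) v
          = st.2.set (k + 1) v := by
        intro v
        rw [show ((k : Int) + 1) = ((k + 1 : Nat) : Int) by push_cast; ring,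
          PySem.List.pySetD_natCast]
      have hG' : ∀ j : Nat, j ≤ k + 1 →
          (st.1.set (k + 1) (grayS (k + 1))).getD j 0 = grayS j := by
        intro j hj
        rw [getD_set]
        by_cases hjk : j = k + 1
        · simp [hjk, hG, hkn]
        · rw [if_neg (by tauto)]; exact hg j (by omega)
      have hr : (PySem.List.pyRange 0 ((k : Int) + 1) 1).foldl
          (fun r j => r + pyget (st.1.set (k + 1) (grayS (k + 1))) j) 0 = colS k := by
        rw [show ((k : Int) + 1) = ((k + 1 : Nat) : Int) by push_cast; ring]
        rw [sum_pyget _ (k + 1) (fun j hj => hG' j (by omega))]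
        exact prefix_colS k
      rw [hsetG, hsetC, hr]
      refine ⟨by simpa using hG, by simpa using hC, hG', ?_⟩
      intro j hj
      rw [getD_set]
      by_cases hjk : j = k + 1
      · rw [if_pos ⟨hjk, by omega⟩, hjk, colS_succ]
      · rw [if_neg (by tauto)]; exact hc j (by omega)

-- ===== VERDICT (by name: the statement is the Claim_ definition above) =====
theorem f_spec : Claim_equal_f := by
  intro n _ hpre
  have hn : 0 ≤ n := hpre
  obtain ⟨m, rfl⟩ : ∃ m : Nat, n = (m : Int) := ⟨n.toNat, (Int.toNat_of_nonneg hn).symm⟩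
  show f (m : Int) = f_alt (m : Int)
  have hB : f_alt (m : Int) = colS m - 1 := by
    have hlen : (PySem.List.pyRange 0 (m : Int) 1).length = m := by
      simp [PySem.List.length_pyRange_one]
    have := foldB (PySem.List.pyRange 0 (m : Int) 1) 0
    rw [hlen] at this
    simp only [f_alt]
    rw [show ((1 : Int), (0 : Int), (0 : Int), (0 : Int)) = T 0 from rfl, this]
    simp [colS]
  have hA : f (m : Int) = colS m - 1 := by
    obtain ⟨_, hC, _, hc⟩ := loopA (m : Int) (by positivity) m le_rfl
    simp only [f]
    rw [PySem.List.pyGetD_natCast]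
    rw [hc m le_rfl]
  rw [hA, hB]
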